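-- pv_equiv track=rewrite | github.com/joserapa/TenTorch | tentorch/utils.py | erase_enum
-- ===== SOURCE A (Python) =====
-- from typing import List, Sequence, Text
--
-- def erase_enum(name: Text) -> Text:
--     """
--     Given a name, returns the same name without any
--     enumeration suffix with format `_{digit}`.
--     """
--     name_list = name.split('_')
--     i = len(name_list) - 1
--     while i >= 0:
--         if name_list[i].isdigit():
--             i -= 1
--         else:
--             break
--     new_name = '_'.join(name_list[:i+1])
--     return new_name
-- ===== SOURCE B (Python) =====
-- def erase_enum(name):
--     """
--     Given a name, returns the same name without any
--     enumeration suffix with format `_{digit}`.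
--     """
--     j = len(name)
--     while True:
--         k = j
--         while k > 0 and name[k - 1].isdigit():
--             k -= 1
--         if k == j:
--             break          # no digit run ends here: keep name[:j]
--         if k == 0:
--             j = 0          # the whole remaining prefix is digits: everything goes
--             break
--         if name[k - 1] == '_':
--             j = k - 1      # strip '_' + digits and look for another suffix
--         else:
--             break
--     return name[:j]
-- ===== Notes on version B (the rewrite author's own statement) =====
-- stated objective: alternative
-- what changed: B drops A's split-on-underscore/token-scan/join pipeline and instead scans the original string backwards by character, repeatedly stripping a maximal digit run preceded by an underscore, returning a single prefix slice with no intermediate token list.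
import Mathlib
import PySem

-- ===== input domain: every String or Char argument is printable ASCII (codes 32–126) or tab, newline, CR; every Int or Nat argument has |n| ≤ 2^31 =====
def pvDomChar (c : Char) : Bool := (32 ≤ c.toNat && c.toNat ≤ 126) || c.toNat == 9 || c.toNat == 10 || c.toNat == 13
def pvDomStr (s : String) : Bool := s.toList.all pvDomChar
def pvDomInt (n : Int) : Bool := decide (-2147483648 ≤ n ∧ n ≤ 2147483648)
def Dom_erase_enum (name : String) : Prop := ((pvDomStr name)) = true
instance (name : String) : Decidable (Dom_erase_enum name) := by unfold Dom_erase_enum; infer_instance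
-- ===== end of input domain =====

-- B replaces A's split('_')/token-scan/join pipeline by a single backward character scan
-- over the original string, returning one prefix slice (objective: alternative decomposition,
-- no intermediate token list).

-- ===== PORT A =====
-- while i >= 0: if name_list[i].isdigit(): i -= 1 else: break
def eraseLoopA (ts : List (List Char)) (i : Int) : Int :=
  if 0 ≤ i then
    if PySem.Chars.strIsdigit (PySem.List.pyGetD ts i []) then eraseLoopA ts (i - 1) else i
  else i
termination_by (i + 1).toNat
decreasing_by omega

def erase_enum (name : String) : String :=
  let name_list := PySem.Chars.splitOn name.toList ['_']
  let i := eraseLoopA name_list (PySem.List.len name_list - 1)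
  String.ofList (PySem.Chars.join ['_'] (PySem.List.slice name_list none (some (i + 1))))

-- ===== PORT B =====
-- inner loop: while k > 0 and name[k-1].isdigit(): k -= 1
-- (name[k-1] has 0 ≤ k-1 < len name whenever it is read; getD's default is never used)
def digitRunB (cs : List Char) (k : Nat) : Nat :=
  if 0 < k ∧ PySem.Chars.isdigit (cs.getD (k - 1) ' ') then digitRunB cs (k - 1) else k
termination_by k
decreasing_by omega

-- needed by outerB's termination proof
theorem digitRunB_le (cs : List Char) (k : Nat) : digitRunB cs k ≤ k := by
  fun_induction digitRunB cs k with
  | case1 k h ih => omega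
  | case2 k h => omega

-- outer 'while True' loop with state j
def outerB (cs : List Char) (j : Nat) : Nat :=
  let k := digitRunB cs j
  if _hkj : k = j then j
  else if k = 0 then 0
  else if cs.getD (k - 1) ' ' = '_' then outerB cs (k - 1)
  else j
termination_by j
decreasing_by have := digitRunB_le cs j; omega

-- name[:j] with 0 ≤ j ≤ len name is a take
def erase_enum_alt (name : String) : String :=
  String.ofList (name.toList.take (outerB name.toList name.toList.length))

-- ===== PRECONDITION & SPEC =====
def Spec_erase_enum (name : String) (out : String) : Prop := out = erase_enum_alt name
instance (name : String) (out : String) : Decidable (Spec_erase_enum name out) := by unfold Spec_erase_enum; infer_instance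

-- ===== CLAIM (what is proved, stated in full; the proofs are below) =====
def Claim_equal_erase_enum : Prop := ∀ (name : String), Dom_erase_enum name → Spec_erase_enum name (erase_enum name)

-- ===== LEMMAS AND PROOFS =====

-- structural version of str.split('_')
def mySplit : List Char → List (List Char)
  | [] => [[]]
  | c :: rest =>
    if c = '_' then [] :: mySplit rest
    else
      match mySplit rest with
      | [] => [[c]]
      | t :: ts => (c :: t) :: ts

theorem mySplit_ne_nil (cs : List Char) : mySplit cs ≠ [] := by
  cases cs with
  | nil => simp [mySplit]
  | cons c rest =>
    simp only [mySplit]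
    split
    · simp
    · split <;> simp

theorem splitOn_go_eq (cs : List Char) : ∀ (fuel : Nat) (cur : List Char) (acc : List (List Char)),
    cs.length ≤ fuel →
    PySem.Chars.splitOn.go ['_'] fuel cs cur acc =
      acc.reverse ++ (match mySplit cs with
        | [] => []
        | t :: ts => (cur.reverse ++ t) :: ts) := by
  induction cs with
  | nil =>
    intro fuel cur acc _
    rw [PySem.Chars.splitOn.go.eq_def]
    cases fuel <;> simp [mySplit]
  | cons c rest ih =>
    intro fuel cur acc hf
    cases fuel with
    | zero => simp at hf
    | succ f =>
      rw [PySem.Chars.splitOn.go.eq_def]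
      simp only [List.isPrefixOf, Bool.and_true]
      by_cases hc : c = '_'
      · subst hc
        simp only [beq_self_eq_true, if_pos, List.length_cons, List.length_nil,
          Nat.zero_add, List.drop_succ_cons, List.drop_zero] at *
        rw [ih f [] (cur.reverse :: acc) (by omega)]
        rcases h : mySplit rest with _ | ⟨t, ts⟩
        · exact absurd h (mySplit_ne_nil rest)
        · simp [mySplit, h]
      · have : ('_' == c) = false := beq_eq_false_iff_ne.mpr (fun h => hc h.symm)
        simp only [this, Bool.false_eq_true, List.length_cons] at *
        rw [ih f (c :: cur) acc (by omega)]
        rcases h : mySplit rest with _ | ⟨t, ts⟩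
        · exact absurd h (mySplit_ne_nil rest)
        · simp [mySplit, h, hc]

theorem splitOn_eq_mySplit (cs : List Char) : PySem.Chars.splitOn cs ['_'] = mySplit cs := by
  unfold PySem.Chars.splitOn
  rw [splitOn_go_eq cs (cs.length + 1) [] [] (by omega)]
  rcases h : mySplit cs with _ | ⟨t, ts⟩
  · exact absurd h (mySplit_ne_nil cs)
  · simp

theorem mySplit_append (xs ys : List Char) :
    mySplit (xs ++ '_' :: ys) = mySplit xs ++ mySplit ys := by
  induction xs with
  | nil => simp [mySplit]
  | cons c xs' ih =>
    by_cases hc : c = '_'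
    · subst hc; simp [mySplit, ih]
    · rcases h : mySplit xs' with _ | ⟨t, ts⟩
      · exact absurd h (mySplit_ne_nil xs')
      · simp [mySplit, hc, ih, h]

theorem mySplit_no_us (xs : List Char) (h : '_' ∉ xs) : mySplit xs = [xs] := by
  induction xs with
  | nil => simp [mySplit]
  | cons c xs' ih =>
    simp only [List.mem_cons, not_or] at h
    simp [mySplit, Ne.symm h.1, ih h.2]

theorem join_mySplit (cs : List Char) : PySem.Chars.join ['_'] (mySplit cs) = cs := by
  induction cs with
  | nil => simp [mySplit, PySem.Chars.join_singleton]
  | cons c rest ih =>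
    by_cases hc : c = '_'
    · subst hc
      rcases h : mySplit rest with _ | ⟨t, ts⟩
      · exact absurd h (mySplit_ne_nil rest)
      · simp only [mySplit, if_true, h]
        rw [PySem.Chars.join_cons_cons, ← h, ih]
        simp
    · rcases h : mySplit rest with _ | ⟨t, ts⟩
      · exact absurd h (mySplit_ne_nil rest)
      · simp only [mySplit, hc, if_false, h]
        cases ts with
        | nil =>
          rw [PySem.Chars.join_singleton]
          rw [h, PySem.Chars.join_singleton] at ih
          simp [ih]
        | cons u ts' =>
          rw [PySem.Chars.join_cons_cons]
          rw [h, PySem.Chars.join_cons_cons] at ih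
          rw [← ih]
          simp

-- every string has a last '_' or none at all
theorem last_us_decomp (cs : List Char) :
    '_' ∉ cs ∨ ∃ pre t, cs = pre ++ '_' :: t ∧ '_' ∉ t := by
  induction cs using List.reverseRecOn with
  | nil => left; simp
  | append_singleton xs c ih =>
    by_cases hc : c = '_'
    · subst hc; right; exact ⟨xs, [], by simp, by simp⟩
    · rcases ih with h | ⟨pre, t, h1, h2⟩
      · left; simp [h, Ne.symm hc]
      · right; exact ⟨pre, t ++ [c], by rw [h1]; simp, by simp [h2, Ne.symm hc]⟩

-- ===== A's while loop =====

theorem eraseLoopA_le (ts : List (List Char)) (i : Int) : eraseLoopA ts i ≤ i := by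
  fun_induction eraseLoopA ts i with
  | case1 i h hd ih => omega
  | case2 i h hd => omega
  | case3 i h => omega

theorem eraseLoopA_ge (ts : List (List Char)) (i : Int) (h : -1 ≤ i) : -1 ≤ eraseLoopA ts i := by
  fun_induction eraseLoopA ts i with
  | case1 i h hd ih => exact ih (by omega)
  | case2 i h hd => omega
  | case3 i h => omega

theorem eraseLoopA_append (ts us : List (List Char)) (i : Int) (h : i < ts.length) :
    eraseLoopA (ts ++ us) i = eraseLoopA ts i := by
  fun_induction eraseLoopA ts i with
  | case1 i h0 hd ih =>
    rw [eraseLoopA]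
    have hget : PySem.List.pyGetD (ts ++ us) i [] = PySem.List.pyGetD ts i [] := by
      rw [PySem.List.pyGetD_eq_getElem (ts ++ us) [] h0 (by simp; omega),
          PySem.List.pyGetD_eq_getElem ts [] h0 (by exact_mod_cast h)]
      exact List.getElem_append_left _
    rw [if_pos h0, hget, if_pos hd]
    exact ih (by omega)
  | case2 i h0 hd =>
    rw [eraseLoopA]
    have hget : PySem.List.pyGetD (ts ++ us) i [] = PySem.List.pyGetD ts i [] := by
      rw [PySem.List.pyGetD_eq_getElem (ts ++ us) [] h0 (by simp; omega),
          PySem.List.pyGetD_eq_getElem ts [] h0 (by exact_mod_cast h)]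
      exact List.getElem_append_left _
    rw [if_pos h0, hget, if_neg hd]
  | case3 i h0 =>
    rw [eraseLoopA, if_neg h0]

-- A's loop + slice = drop the trailing all-digit tokens
theorem eraseLoopA_take (ts : List (List Char)) :
    ts.take ((eraseLoopA ts ((ts.length : Int) - 1) + 1).toNat) =
      (ts.reverse.dropWhile PySem.Chars.strIsdigit).reverse := by
  induction ts using List.reverseRecOn with
  | nil => simp
  | append_singleton ts t ih =>
    have hlen : ((ts ++ [t]).length : Int) - 1 = (ts.length : Int) := by simp
    rw [hlen, eraseLoopA]
    have hget : PySem.List.pyGetD (ts ++ [t]) (ts.length : Int) [] = t := by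
      rw [PySem.List.pyGetD_eq_getElem (ts ++ [t]) [] (by omega) (by simp)]
      simp
    rw [if_pos (by omega), hget]
    by_cases hd : PySem.Chars.strIsdigit t = true
    · rw [if_pos hd]
      rw [eraseLoopA_append ts [t] _ (by omega)]
      have hle := eraseLoopA_le ts ((ts.length : Int) - 1)
      rw [List.take_append_of_le_length (by simp; omega)]
      rw [ih]
      simp [List.dropWhile_cons_of_pos hd]
    · rw [if_neg hd]
      have : ((ts.length : Int) + 1).toNat = (ts ++ [t]).length := by simp
      rw [this, List.take_length]
      simp [List.dropWhile_cons_of_neg (by simpa using hd)]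

def Acore (cs : List Char) : List Char :=
  PySem.Chars.join ['_'] (((mySplit cs).reverse.dropWhile PySem.Chars.strIsdigit).reverse)

theorem erase_enum_eq_Acore (name : String) :
    erase_enum name = String.ofList (Acore name.toList) := by
  unfold erase_enum Acore
  simp only [splitOn_eq_mySplit, PySem.List.len_eq]
  have hge : -1 ≤ eraseLoopA (mySplit name.toList) (((mySplit name.toList).length : Int) - 1) :=
    eraseLoopA_ge _ _ (by omega)
  rw [PySem.List.slice_to _ (by omega)]
  rw [eraseLoopA_take]

-- ===== B's loops =====

theorem digitRunB_prefix (xs ys : List Char) (k : Nat) (h : k ≤ xs.length) :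
    digitRunB (xs ++ ys) k = digitRunB xs k := by
  fun_induction digitRunB xs k with
  | case1 k hc ih =>
    rw [digitRunB]
    rw [List.getD_append _ _ _ _ (by omega)]
    rw [if_pos hc]
    exact ih (by omega)
  | case2 k hc =>
    rw [digitRunB]
    by_cases h0 : 0 < k
    · rw [List.getD_append _ _ _ _ (by omega)]
      rw [if_neg hc]
    · rw [if_neg (by omega)]

theorem digitRunB_split (xs d : List Char)
    (hd : ∀ c ∈ d, PySem.Chars.isdigit c = true)
    (hx : ∀ c, xs.getLast? = some c → PySem.Chars.isdigit c = false) :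
    digitRunB (xs ++ d) (xs.length + d.length) = xs.length := by
  induction d using List.reverseRecOn with
  | nil =>
    simp only [List.append_nil, List.length_nil, Nat.add_zero]
    cases xs using List.reverseRecOn with
    | nil => rw [digitRunB]; simp
    | append_singleton ys c =>
      rw [digitRunB]
      have hlast : (ys ++ [c]).getLast? = some c := by simp
      have hget : (ys ++ [c]).getD ((ys ++ [c]).length - 1) ' ' = c := by simp
      rw [if_neg (by rw [hget]; simp [hx c hlast])]
  | append_singleton d c ihd =>
    have hc : PySem.Chars.isdigit c = true := hd c (by simp)
    rw [digitRunB]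
    have h1 : xs.length + (d ++ [c]).length - 1 = (xs ++ d).length := by simp
    have hget : (xs ++ (d ++ [c])).getD (xs.length + (d ++ [c]).length - 1) ' ' = c := by
      rw [h1, show xs ++ (d ++ [c]) = (xs ++ d) ++ [c] by simp]
      simp
    rw [if_pos ⟨by simp, by rw [hget]; exact hc⟩]
    rw [h1, show xs ++ (d ++ [c]) = (xs ++ d) ++ [c] by simp]
    rw [digitRunB_prefix _ _ _ (by simp)]
    have := ihd (fun x hx => hd x (by simp [hx]))
    simpa using this

theorem outerB_le (cs : List Char) (j : Nat) : outerB cs j ≤ j := by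
  fun_induction outerB cs j with
  | case1 j k h => omega
  | case2 j k h h0 => omega
  | case3 j k h h0 hu ih => have := digitRunB_le cs j; omega
  | case4 j k h h0 hu => omega

theorem outerB_prefix (xs ys : List Char) (j : Nat) (h : j ≤ xs.length) :
    outerB (xs ++ ys) j = outerB xs j := by
  fun_induction outerB xs j with
  | case1 j k hkj =>
    rw [outerB]
    simp only [digitRunB_prefix xs ys j h]
    rw [dif_pos hkj]
  | case2 j k hkj h0 =>
    rw [outerB]
    simp only [digitRunB_prefix xs ys j h]
    rw [dif_neg hkj, if_pos h0]
  | case3 j k hkj h0 hu ih =>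
    rw [outerB]
    simp only [digitRunB_prefix xs ys j h]
    have hkle := digitRunB_le xs j
    have hget : (xs ++ ys).getD (digitRunB xs j - 1) ' ' = xs.getD (digitRunB xs j - 1) ' ' :=
      List.getD_append _ _ _ _ (by omega)
    rw [dif_neg hkj, if_neg h0, if_pos (by rw [hget]; exact hu)]
    exact ih (by omega)
  | case4 j k hkj h0 hu =>
    rw [outerB]
    simp only [digitRunB_prefix xs ys j h]
    have hkle := digitRunB_le xs j
    have hget : (xs ++ ys).getD (digitRunB xs j - 1) ' ' = xs.getD (digitRunB xs j - 1) ' ' :=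
      List.getD_append _ _ _ _ (by omega)
    rw [dif_neg hkj, if_neg h0, if_neg (by rw [hget]; exact hu)]

def Bcore (cs : List Char) : List Char := cs.take (outerB cs cs.length)

theorem Bcore_nodigit (cs : List Char)
    (hx : ∀ c, cs.getLast? = some c → PySem.Chars.isdigit c = false) : Bcore cs = cs := by
  have hk : digitRunB cs cs.length = cs.length := by
    have := digitRunB_split cs [] (by simp) hx
    simpa using this
  unfold Bcore
  rw [outerB]
  simp only [hk]
  exact List.take_length

theorem Bcore_all_digits (d : List Char) (hne : d ≠ [])
    (hd : ∀ c ∈ d, PySem.Chars.isdigit c = true) : Bcore d = [] := by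
  have hk : digitRunB d d.length = 0 := by
    have := digitRunB_split [] d hd (by simp)
    simpa using this
  have hlen : 0 < d.length := List.length_pos_iff.mpr hne
  unfold Bcore
  rw [outerB]
  simp only [hk]
  simp
  exact Or.inl (fun h0 => absurd h0.symm (by omega))

theorem Bcore_keep2 (xs d : List Char) (c : Char)
    (hd : ∀ x ∈ d, PySem.Chars.isdigit x = true)
    (hc : xs.getLast? = some c) (hcd : PySem.Chars.isdigit c = false) (hcu : c ≠ '_')
    (hdne : d ≠ []) : Bcore (xs ++ d) = xs ++ d := by
  have hxne : xs ≠ [] := by rintro rfl; simp at hc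
  have hk : digitRunB (xs ++ d) (xs ++ d).length = xs.length := by
    have := digitRunB_split xs d hd (fun x hx => by rw [hc] at hx; cases hx; exact hcd)
    simpa using this
  have hxlen : 0 < xs.length := List.length_pos_iff.mpr hxne
  have hdlen : 0 < d.length := List.length_pos_iff.mpr hdne
  have hget : (xs ++ d).getD (xs.length - 1) ' ' = c := by
    rw [List.getD_append _ _ _ _ (by omega)]
    rw [List.getD_eq_getElem?_getD, ← List.getLast?_eq_getElem?, hc]
    rfl
  unfold Bcore
  rw [outerB]
  simp only [hk]
  rw [dif_neg (by simp; omega), if_neg (by omega), if_neg (by rw [hget]; exact hcu)]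
  exact List.take_length

theorem Bcore_strip (xs d : List Char) (hdne : d ≠ [])
    (hd : ∀ x ∈ d, PySem.Chars.isdigit x = true) :
    Bcore (xs ++ '_' :: d) = Bcore xs := by
  have hsplit : xs ++ '_' :: d = (xs ++ ['_']) ++ d := by simp
  have hk : digitRunB (xs ++ '_' :: d) (xs ++ '_' :: d).length = xs.length + 1 := by
    rw [hsplit]
    have := digitRunB_split (xs ++ ['_']) d hd
      (fun x hx => by simp at hx; cases hx; decide)
    simpa [Nat.add_assoc, Nat.add_comm, Nat.add_left_comm] using this
  have hdlen : 0 < d.length := List.length_pos_iff.mpr hdne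
  have hget : (xs ++ '_' :: d).getD (xs.length + 1 - 1) ' ' = '_' := by
    simp
  unfold Bcore
  rw [outerB]
  simp only [hk]
  rw [dif_neg (by simp; omega), if_neg (by omega), if_pos hget]
  have hle := outerB_le (xs ++ '_' :: d) (xs.length + 1 - 1)
  rw [show xs.length + 1 - 1 = xs.length from rfl] at *
  rw [show xs ++ '_' :: d = xs ++ ('_' :: d) from rfl, outerB_prefix xs ('_' :: d) xs.length le_rfl]
  have hle2 := outerB_le xs xs.length
  rw [List.take_append_of_le_length hle2]

-- ===== trailing digit run of a character list =====

theorem strIsdigit_iff (t : List Char) :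
    PySem.Chars.strIsdigit t = true ↔ t ≠ [] ∧ ∀ x ∈ t, PySem.Chars.isdigit x = true := by
  simp [PySem.Chars.strIsdigit, List.all_eq_true]

theorem trail_decomp (t : List Char) :
    ∃ t1 d, t = t1 ++ d ∧ (∀ x ∈ d, PySem.Chars.isdigit x = true) ∧
      (∀ x, t1.getLast? = some x → PySem.Chars.isdigit x = false) ∧
      (∀ c, t.getLast? = some c → PySem.Chars.isdigit c = true → d ≠ []) := by
  refine ⟨(t.reverse.dropWhile PySem.Chars.isdigit).reverse,
          (t.reverse.takeWhile PySem.Chars.isdigit).reverse, ?_, ?_, ?_, ?_⟩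
  · rw [← List.reverse_append, List.takeWhile_append_dropWhile, List.reverse_reverse]
  · intro x hx
    rw [List.mem_reverse] at hx
    exact List.mem_takeWhile_imp hx
  · intro x hx
    rw [List.getLast?_reverse] at hx
    have hne : t.reverse.dropWhile PySem.Chars.isdigit ≠ [] := by
      intro h; rw [h] at hx; cases hx
    have := List.head_dropWhile_not PySem.Chars.isdigit hne
    have hxx : (t.reverse.dropWhile PySem.Chars.isdigit).head hne = x := by
      rw [List.head?_eq_some_head hne] at hx
      exact Option.some.inj hx
    rwa [hxx] at this
  · intro c hc hcd
    rw [← List.head?_reverse] at hc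
    cases hr : t.reverse with
    | nil => rw [hr] at hc; cases hc
    | cons x r =>
      rw [hr] at hc
      simp only [List.head?_cons, Option.some.injEq] at hc
      subst hc
      rw [List.takeWhile_cons_of_pos hcd]
      simp

-- ===== the master induction =====

theorem Acore_eq_Bcore_aux : ∀ (n : Nat) (cs : List Char), cs.length ≤ n → Acore cs = Bcore cs := by
  intro n
  induction n with
  | zero =>
    intro cs h
    have : cs = [] := List.length_eq_zero_iff.mp (by omega)
    subst this
    have hb : Bcore [] = [] := Bcore_nodigit [] (fun c hc => by simp at hc)
    have ha : Acore [] = [] := by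
      unfold Acore
      rw [show mySplit [] = [[]] from rfl,
          show ([[]] : List (List Char)).reverse = [[]] from rfl,
          List.dropWhile_cons_of_neg (by decide)]
      rfl
    rw [ha, hb]
  | succ n ih =>
    intro cs hlen
    rcases last_us_decomp cs with hno | ⟨pre, t, hcs, hnot⟩
    · -- no '_' in cs
      have hA0 : mySplit cs = [cs] := mySplit_no_us cs hno
      by_cases hdig : PySem.Chars.strIsdigit cs = true
      · -- whole name is digits: both sides empty
        have hA : Acore cs = [] := by
          unfold Acore
          rw [hA0]
          simp [List.dropWhile_cons_of_pos hdig, PySem.Chars.join_nil]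
        obtain ⟨hne, hall⟩ := (strIsdigit_iff cs).mp hdig
        rw [hA, Bcore_all_digits cs hne hall]
      · have hA : Acore cs = cs := by
          unfold Acore
          rw [hA0]
          simp [List.dropWhile_cons_of_neg (by simpa using hdig), PySem.Chars.join_singleton]
        rw [hA]
        rcases hlast : cs.getLast? with _ | c
        · exact (Bcore_nodigit cs (fun x hx => by rw [hlast] at hx; cases hx)).symm
        by_cases hcd : PySem.Chars.isdigit c = true
        · obtain ⟨t1, d, ht, hdd, ht1, hdne⟩ := trail_decomp cs
          have hdne' : d ≠ [] := hdne c hlast hcd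
          have ht1ne : t1 ≠ [] := by
            rintro rfl
            simp only [List.nil_append] at ht
            exact hdig ((strIsdigit_iff cs).mpr
              ⟨by intro h; rw [h] at hlast; simp at hlast, by rw [ht]; exact hdd⟩)
          rcases hl1 : t1.getLast? with _ | c1
          · exact absurd (List.getLast?_eq_none_iff.mp hl1) ht1ne
          have hc1mem : c1 ∈ cs := by
            rw [ht]; exact List.mem_append_left _ (List.mem_of_getLast? hl1)
          rw [ht]
          exact (Bcore_keep2 t1 d c1 hdd hl1 (ht1 c1 hl1)
            (fun h => hno (h ▸ hc1mem)) hdne').symm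
        · exact (Bcore_nodigit cs (fun x hx => by
            rw [hlast] at hx; cases hx; simpa using hcd)).symm
    · -- cs = pre ++ '_' :: t with '_' ∉ t
      subst hcs
      by_cases hdig : PySem.Chars.strIsdigit t = true
      · -- trailing token is an enumeration suffix: recurse on pre
        obtain ⟨htne, hall⟩ := (strIsdigit_iff t).mp hdig
        have hA : Acore (pre ++ '_' :: t) = Acore pre := by
          unfold Acore
          rw [mySplit_append, mySplit_no_us t hnot]
          rw [show (mySplit pre ++ [t]).reverse = t :: (mySplit pre).reverse from by simp]
          rw [List.dropWhile_cons_of_pos hdig]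
        have hB : Bcore (pre ++ '_' :: t) = Bcore pre := Bcore_strip pre t htne hall
        rw [hA, hB]
        exact ih pre (by simp at hlen; omega)
      · have hA : Acore (pre ++ '_' :: t) = pre ++ '_' :: t := by
          unfold Acore
          rw [mySplit_append, mySplit_no_us t hnot]
          rw [show (mySplit pre ++ [t]).reverse = t :: (mySplit pre).reverse from by simp]
          rw [List.dropWhile_cons_of_neg (by simpa using hdig)]
          rw [show (t :: (mySplit pre).reverse).reverse = mySplit pre ++ [t] from by simp]
          rw [← mySplit_no_us t hnot, ← mySplit_append, join_mySplit]
        rw [hA]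
        rcases hlast : (pre ++ '_' :: t).getLast? with _ | c
        · exact absurd (List.getLast?_eq_none_iff.mp hlast) (by simp)
        by_cases hcd : PySem.Chars.isdigit c = true
        · have htne : t ≠ [] := by
            rintro rfl
            rw [show pre ++ ['_'] = pre ++ ['_'] from rfl,
                List.getLast?_append_of_ne_nil pre (by simp)] at hlast
            simp only [List.getLast?_singleton, Option.some.injEq] at hlast
            rw [← hlast] at hcd
            simp [PySem.Chars.isdigit] at hcd
          have hlt : t.getLast? = some c := by
            rw [show pre ++ '_' :: t = (pre ++ ['_']) ++ t from by simp,
                List.getLast?_append_of_ne_nil _ htne] at hlast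
            exact hlast
          obtain ⟨t1, d, ht, hdd, ht1, hdne⟩ := trail_decomp t
          have hdne' : d ≠ [] := hdne c hlt hcd
          have ht1ne : t1 ≠ [] := by
            rintro rfl
            simp only [List.nil_append] at ht
            exact hdig ((strIsdigit_iff t).mpr ⟨htne, by rw [ht]; exact hdd⟩)
          rcases hl1 : t1.getLast? with _ | c1
          · exact absurd (List.getLast?_eq_none_iff.mp hl1) ht1ne
          have key : pre ++ '_' :: t = (pre ++ '_' :: t1) ++ d := by rw [ht]; simp
          rw [key]
          refine (Bcore_keep2 (pre ++ '_' :: t1) d c1 hdd ?_ (ht1 c1 hl1) ?_ hdne').symm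
          · rw [show pre ++ '_' :: t1 = (pre ++ ['_']) ++ t1 from by simp,
                List.getLast?_append_of_ne_nil _ ht1ne]
            exact hl1
          · intro h
            exact hnot (ht ▸ List.mem_append_left d (h ▸ List.mem_of_getLast? hl1))
        · exact (Bcore_nodigit (pre ++ '_' :: t) (fun x hx => by
            rw [hlast] at hx; cases hx; simpa using hcd)).symm
  
theorem Acore_eq_Bcore (cs : List Char) : Acore cs = Bcore cs :=
  Acore_eq_Bcore_aux cs.length cs le_rfl

-- ===== VERDICT (by name: the statement is the Claim_ definition above) =====
theorem erase_enum_spec : Claim_equal_erase_enum := by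
  intro name _
  unfold Spec_erase_enum
  rw [erase_enum_eq_Acore, Acore_eq_Bcore]
  rfl
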